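-- pv_equiv track=rewrite | github.com/proska/mowgli-in-the-jungle | mowgli/utils/graphs/Lexicalization/CNQueryLexic.py | _separate_edges
-- ===== SOURCE A (Python) =====
-- from collections import deque
-- from typing import List, Union, Iterable, Generator
--
-- def _separate_edges(path: Iterable[str]) -> Generator[List[str], None, None]:
--     d = deque(maxlen=3)
--     iterable = iter(path)
--     for i, it in enumerate(iterable):
--         d.append(it)
--         if len(d) == 3:
--             yield list(d)
--             d.popleft()
--             d.popleft()
-- ===== SOURCE B (Python) =====
-- def _separate_edges(path):
--     items = list(path)
--     for i in range(0, len(items) - 2, 2):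
--         yield items[i:i + 3]
-- ===== Notes on version B (the rewrite author's own statement) =====
-- stated objective: simpler
-- what changed: B materializes the iterable and yields list slices items[i:i+3] at indices from range(0, len-2, 2), replacing A's streaming deque with per-element append/popleft sliding-window bookkeeping.
import Mathlib
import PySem

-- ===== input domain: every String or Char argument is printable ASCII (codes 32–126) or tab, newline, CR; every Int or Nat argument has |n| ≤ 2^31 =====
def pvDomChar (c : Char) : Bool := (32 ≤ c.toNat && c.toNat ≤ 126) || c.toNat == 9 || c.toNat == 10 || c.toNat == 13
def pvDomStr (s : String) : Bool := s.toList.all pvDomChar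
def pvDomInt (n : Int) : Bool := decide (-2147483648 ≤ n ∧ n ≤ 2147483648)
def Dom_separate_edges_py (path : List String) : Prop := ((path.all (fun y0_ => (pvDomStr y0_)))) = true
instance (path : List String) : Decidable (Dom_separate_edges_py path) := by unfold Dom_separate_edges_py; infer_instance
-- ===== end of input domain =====

-- B replaces A's streaming deque sliding window with index-based slicing over the
-- materialized list (simpler); same output for every finite input.

-- ===== PORT A =====
-- loop over the iterable, maintaining the deque d (maxlen 3 never trims: d has ≤ 2
-- elements before each append, so append is plain append); yield list(d) and popleft twice
def sepLoopA : List String → List String → List (List String)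
  | [], _ => []
  | it :: rest, d =>
      let d' := d ++ [it]
      if d'.length == 3 then d' :: sepLoopA rest (d'.drop 2)
      else sepLoopA rest d'

def separate_edges_py (path : List String) : List (List String) :=
  sepLoopA path []

-- ===== PORT B =====
def separate_edges_py_alt (path : List String) : List (List String) :=
  let items := path
  (PySem.List.pyRange 0 ((items.length : Int) - 2) 2).map
    (fun i => PySem.List.slice items (some i) (some (i + 3)))

-- ===== PRECONDITION & SPEC =====
def Spec_separate_edges_py (path : List String) (out : List (List String)) : Prop := out = separate_edges_py_alt path
instance (path : List String) (out : List (List String)) : Decidable (Spec_separate_edges_py path out) := by unfold Spec_separate_edges_py; infer_instance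

-- ===== CLAIM (what is proved, stated in full; the proofs are below) =====
def Claim_equal_separate_edges_py : Prop := ∀ (path : List String), Dom_separate_edges_py path → Spec_separate_edges_py path (separate_edges_py path)

-- ===== LEMMAS AND PROOFS =====

-- ===== VERDICT (by name: the statement is the Claim_ definition above) =====
-- the common specification: overlapping triples stepping by two
def triSpec : List String → List (List String)
  | a :: b :: c :: rest => [a, b, c] :: triSpec (c :: rest)
  | _ => []
termination_by l => l.length

lemma a_eq_tri : ∀ (path : List String), sepLoopA path [] = triSpec path
  | a :: b :: c :: rest => by
      have ih := a_eq_tri (c :: rest)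
      simp [sepLoopA, triSpec] at ih ⊢
      exact ih
  | [] => by simp [sepLoopA, triSpec]
  | [a] => by simp [sepLoopA, triSpec]
  | [a, b] => by simp [sepLoopA, triSpec]
termination_by l => l.length

lemma pyRange_two_cons (m : Int) (hm : 0 < m) :
    PySem.List.pyRange 0 m 2 = 0 :: (PySem.List.pyRange 0 (m - 2) 2).map (· + 2) := by
  rw [PySem.List.pyRange_of_pos 0 m (by norm_num), PySem.List.pyRange_of_pos 0 (m - 2) (by norm_num)]
  by_cases h : 0 < m - 2
  · have hc : ((m - 0 + 2 - 1) / 2).toNat = ((m - 2 - 0 + 2 - 1) / 2).toNat + 1 := by omega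
    rw [if_pos hm, if_pos h, hc, List.range_succ_eq_map, List.map_cons, List.map_map,
        List.map_map]
    refine congrArg₂ _ (by norm_num) ?_
    apply List.map_congr_left
    intro k _
    simp only [Function.comp_apply]
    push_cast
    ring
  · have hc : ((m - 0 + 2 - 1) / 2).toNat = 1 := by omega
    rw [if_pos hm, if_neg h, hc]
    norm_num

lemma b_eq_tri : ∀ (path : List String), separate_edges_py_alt path = triSpec path
  | a :: b :: c :: rest => by
      have ih := b_eq_tri (c :: rest)
      simp only [separate_edges_py_alt] at ih ⊢
      have hlen : ((a :: b :: c :: rest).length : Int) - 2 = ((c :: rest).length : Int) := by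
        simp only [List.length_cons]; push_cast; ring
      have hpos : (0 : Int) < ((c :: rest).length : Int) := by
        simp only [List.length_cons]; push_cast; omega
      rw [hlen, pyRange_two_cons _ hpos, List.map_cons, List.map_map]
      have h0 : PySem.List.slice (a :: b :: c :: rest) (some 0) (some (0 + 3)) = [a, b, c] := by
        rw [PySem.List.slice_toNat _ le_rfl (by norm_num)]
        rfl
      rw [h0]
      have hmap : ((PySem.List.pyRange 0 (((c :: rest).length : Int) - 2) 2).map
            ((fun i => PySem.List.slice (a :: b :: c :: rest) (some i) (some (i + 3))) ∘ (· + 2)))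
          = (PySem.List.pyRange 0 (((c :: rest).length : Int) - 2) 2).map
            (fun i => PySem.List.slice (c :: rest) (some i) (some (i + 3))) := by
        apply List.map_congr_left
        intro i hi
        have hi0 : 0 ≤ i := by
          rw [PySem.List.pyRange_of_pos 0 _ (by norm_num)] at hi
          obtain ⟨k, _, hk⟩ := List.mem_map.mp hi
          omega
        show PySem.List.slice (a :: b :: c :: rest) (some (i + 2)) (some (i + 2 + 3)) = _
        rw [PySem.List.slice_toNat _ (by omega) (by omega),
            PySem.List.slice_toNat _ hi0 (by omega)]
        have h1 : (i + 2).toNat = i.toNat + 2 := by omega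
        have h2 : (i + 2 + 3).toNat = (i + 3).toNat + 2 := by omega
        simp [h1, h2]
      rw [hmap, ih]
      simp [triSpec]
  | [] => by simp [separate_edges_py_alt, triSpec, PySem.List.pyRange]
  | [a] => by
      simp only [separate_edges_py_alt]
      rw [PySem.List.pyRange_of_pos 0 _ (by norm_num)]
      norm_num
      simp [triSpec]
  | [a, b] => by
      simp only [separate_edges_py_alt]
      rw [PySem.List.pyRange_of_pos 0 _ (by norm_num)]
      norm_num
      simp [triSpec]
termination_by l => l.length

theorem separate_edges_py_spec : Claim_equal_separate_edges_py := by
  intro path _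
  show separate_edges_py path = separate_edges_py_alt path
  rw [show separate_edges_py path = sepLoopA path [] from rfl, a_eq_tri, b_eq_tri]
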